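-- pv_equiv track=rewrite | github.com/google/model-transparency | model_signing/serialize.py | _create_tasks
-- ===== SOURCE A (Python) =====
-- def _create_tasks(children :[], shard_size: int) -> [[]]:
--     tasks = [[]] * 0
--     curr_file = 0
--     curr_bytes = 0
--     total_bytes = 0
--
--     while True:
--         # All files have been processed.
--         if curr_file >= len(children):
--             break
--
--         name, typ, size = children[curr_file]
--
--         ### It's a directory.
--         # NOTE: It is fast to commupte the hash because there's no data besides the name and the type.
--         if typ == "dir":
--             curr_bytes = 0
--             tasks += [(name, typ, 0, size)]
--             curr_file += 1
--             continue
--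
--         ### It's a file.
--
--         # Sanity checks.
--         if size <= curr_bytes and size > 0:
--             raise ValueError(f"internal: size={size}, curr_bytes={curr_bytes} for {children[curr_file]}")
--
--         # Compute the number of bytes to process.
--         start_pos = curr_bytes
--         available_bytes = size - start_pos
--         if available_bytes < 0:
--             raise ValueError(f"internal: available_bytes is {available_bytes}")
--         processed_bytes = min(available_bytes, shard_size)
--         end_pos = curr_bytes + processed_bytes
--         curr_bytes += processed_bytes
--         total_bytes += processed_bytes
--
--         # Record the task.
--         tasks += [(name, typ, start_pos, end_pos)]
--
--         # If we have processed all bytes, we move on to the next file.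
--         if available_bytes - processed_bytes == 0:
--             curr_file += 1
--             curr_bytes = 0
--
--     return tasks
-- ===== SOURCE B (Python) =====
-- def _create_tasks(children, shard_size):
--     tasks = []
--     for name, typ, size in children:
--         if typ == "dir":
--             tasks.append((name, typ, 0, size))
--         elif size == 0:
--             tasks.append((name, typ, 0, 0))
--         else:
--             starts = range(0, size, shard_size)
--             chunk = [None] * len(starts)  # one shard per range element, allocated up front
--             for i, start in enumerate(starts):
--                 chunk[i] = (name, typ, start, min(start + shard_size, size))
--             tasks.extend(chunk)
--     return tasks
-- ===== Notes on version B (the rewrite author's own statement) =====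
-- stated objective: simpler
-- what changed: Replaces A's while-True state machine over (curr_file, curr_bytes) with a plain for-loop over children that emits each file's shards directly via range(0, size, shard_size), dropping the unused total_bytes and the dead sanity checks.
import Mathlib
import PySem

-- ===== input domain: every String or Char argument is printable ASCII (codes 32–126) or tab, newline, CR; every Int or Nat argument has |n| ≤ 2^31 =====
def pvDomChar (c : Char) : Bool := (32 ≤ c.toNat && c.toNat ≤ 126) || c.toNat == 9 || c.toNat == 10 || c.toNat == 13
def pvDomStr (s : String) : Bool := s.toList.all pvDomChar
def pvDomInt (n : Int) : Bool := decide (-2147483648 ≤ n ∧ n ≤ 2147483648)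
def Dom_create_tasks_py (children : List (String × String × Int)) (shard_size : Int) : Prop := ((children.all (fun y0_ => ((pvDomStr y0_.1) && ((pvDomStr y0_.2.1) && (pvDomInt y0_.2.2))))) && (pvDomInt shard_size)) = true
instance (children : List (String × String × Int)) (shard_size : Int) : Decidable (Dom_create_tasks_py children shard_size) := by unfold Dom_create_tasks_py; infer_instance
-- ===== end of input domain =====

-- B replaces A's while-True state machine over (curr_file, curr_bytes) with a plain for-loop
-- over children emitting each file's shards via range(0, size, shard_size) — simpler, same cost.

-- ===== PORT A =====
-- The while-True loop of A, as recursion on the remaining children with state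
-- (curr_bytes, tasks).  The fuel argument only makes the recursion total: on every
-- input admitted by Pre_create_tasks_py the supplied fuel exceeds the number of
-- iterations Python performs, so it is never exhausted (Python diverges when
-- shard_size <= 0 meets a positive-size file; such inputs are outside Pre_).
def aLoop (ss : Int) : Nat → List (String × String × Int) → Int →
    List (String × String × Int × Int) → List (String × String × Int × Int)
  | 0, _, _, tasks => tasks          -- fuel exhausted (unreachable under Pre_)
  | _ + 1, [], _, tasks => tasks     -- curr_file >= len(children): break
  | fuel + 1, (name, typ, size) :: rest, curr_bytes, tasks =>
    if typ == "dir" then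
      aLoop ss fuel rest 0 (tasks ++ [(name, typ, 0, size)])
    else if size ≤ curr_bytes ∧ 0 < size then
      tasks                          -- Python: raise ValueError (excluded by Pre_)
    else
      let start_pos := curr_bytes
      let available_bytes := size - start_pos
      if available_bytes < 0 then
        tasks                        -- Python: raise ValueError (excluded by Pre_)
      else
        let processed_bytes := min available_bytes ss
        let end_pos := curr_bytes + processed_bytes
        let tasks' := tasks ++ [(name, typ, start_pos, end_pos)]
        if available_bytes - processed_bytes = 0 then
          aLoop ss fuel rest 0 tasks'
        else
          aLoop ss fuel ((name, typ, size) :: rest) (curr_bytes + processed_bytes) tasks'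

-- fuel bound: one iteration per dir + at most size+1 iterations per file (shard_size ≥ 1)
def aFuel (children : List (String × String × Int)) : Nat :=
  children.foldl (fun acc c => acc + c.2.2.natAbs + 1) 1

def create_tasks_py (children : List (String × String × Int)) (shard_size : Int) :
    List (String × String × Int × Int) :=
  aLoop shard_size (aFuel children) children 0 []

-- ===== PORT B =====
def fileShards (name typ : String) (size ss : Int) : List (String × String × Int × Int) :=
  if size = 0 then [(name, typ, 0, 0)]
  else (PySem.List.pyRange 0 size ss).map (fun start => (name, typ, start, min (start + ss) size))

def create_tasks_py_alt (children : List (String × String × Int)) (shard_size : Int) :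
    List (String × String × Int × Int) :=
  children.flatMap (fun c =>
    if c.2.1 == "dir" then [(c.1, c.2.1, 0, c.2.2)]
    else fileShards c.1 c.2.1 c.2.2 shard_size)

-- ===== PRECONDITION & SPEC =====
-- Pre_ admits exactly the inputs on which Python A returns: a non-dir child of
-- negative size makes A raise ValueError ("available_bytes is negative"), and a
-- non-positive shard_size makes A's while-loop spin forever on any non-dir child
-- (except that shard_size = 0 still terminates when every non-dir child has size 0,
-- and any shard_size terminates when every child is a dir).
def Pre_create_tasks_py (children : List (String × String × Int)) (shard_size : Int) : Prop :=
  (∀ c ∈ children, c.2.1 ≠ "dir" → 0 ≤ c.2.2) ∧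
    (1 ≤ shard_size ∨ (∀ c ∈ children, c.2.1 = "dir") ∨
      (shard_size = 0 ∧ ∀ c ∈ children, c.2.1 ≠ "dir" → c.2.2 = 0))
instance (children : List (String × String × Int)) (shard_size : Int) : Decidable (Pre_create_tasks_py children shard_size) := by unfold Pre_create_tasks_py; infer_instance
def pvWitness_create_tasks_py : (List (String × String × Int)) × Int :=
  ([("a", "file", 5), ("d", "dir", 0), ("b", "file", 0)], 2)

def Spec_create_tasks_py (children : List (String × String × Int)) (shard_size : Int) (out : List (String × String × Int × Int)) : Prop := out = create_tasks_py_alt children shard_size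
instance (children : List (String × String × Int)) (shard_size : Int) (out : List (String × String × Int × Int)) : Decidable (Spec_create_tasks_py children shard_size out) := by unfold Spec_create_tasks_py; infer_instance

-- ===== CLAIM (what is proved, stated in full; the proofs are below) =====
def Claim_equal_create_tasks_py : Prop := ∀ (children : List (String × String × Int)) (shard_size : Int), Dom_create_tasks_py children shard_size → Pre_create_tasks_py children shard_size → Spec_create_tasks_py children shard_size (create_tasks_py children shard_size)

-- ===== LEMMAS AND PROOFS =====

theorem pyRange_pos_cons (a b s : Int) (hs : 0 < s) (hab : a < b) :
    PySem.List.pyRange a b s = a :: PySem.List.pyRange (a+s) b s := by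
  rw [PySem.List.pyRange_of_pos _ _ hs, PySem.List.pyRange_of_pos _ _ hs]
  by_cases h2 : a + s < b
  · simp only [if_pos hab, if_pos h2]
    have key : ((b - a + s - 1) / s).toNat = ((b - (a+s) + s - 1) / s).toNat + 1 := by
      have h3 : (b - a + s - 1) / s = (b - (a+s) + s - 1) / s + 1 := by
        have h := Int.add_mul_ediv_right (b - (a+s) + s - 1) 1 (by omega : s ≠ 0)
        rw [one_mul] at h
        rw [show b - a + s - 1 = b - (a + s) + s - 1 + s by ring, h]
      have h4 : 0 ≤ (b - (a+s) + s - 1) / s := Int.ediv_nonneg (by omega) (by omega)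
      omega
    rw [key, List.range_succ_eq_map]
    simp only [List.map_cons, List.map_map, List.cons.injEq]
    refine ⟨by norm_num,
      List.map_congr_left (fun k _ => by simp [Function.comp]; ring)⟩
  · simp only [if_pos hab, if_neg h2]
    have key : ((b - a + s - 1) / s).toNat = 1 := by
      have h5 : (b - a + s - 1) / s = 1 := by
        rw [show b - a + s - 1 = (b - a - 1) + 1 * s by ring,
            Int.add_mul_ediv_right _ _ (by omega : s ≠ 0),
            Int.ediv_eq_zero_of_lt (by omega) (by omega)]
        ring
      omega
    rw [key]; simp [List.range_succ]

theorem pyRange_pos_nil (a b s : Int) (hs : 0 < s) (hab : b ≤ a) :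
    PySem.List.pyRange a b s = [] := by
  rw [PySem.List.pyRange_of_pos _ _ hs, if_neg (by omega)]; simp

theorem aLoop_nil (ss : Int) : ∀ (g : Nat) (b : Int) (t : List (String × String × Int × Int)),
    aLoop ss g [] b t = t := by
  intro g b t; cases g <;> rfl

-- accumulator lemma: the tasks list only ever grows on the right
theorem aLoop_append (ss : Int) : ∀ (fuel : Nat) (cs : List (String × String × Int))
    (b : Int) (t1 t2 : List (String × String × Int × Int)),
    aLoop ss fuel cs b (t1 ++ t2) = t1 ++ aLoop ss fuel cs b t2 := by
  intro fuel
  induction fuel with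
  | zero => intro cs b t1 t2; rfl
  | succ f ih =>
    intro cs b t1 t2
    match cs with
    | [] => rfl
    | (name, typ, size) :: rest =>
      simp only [aLoop]
      split_ifs <;>
        first
          | rfl
          | (rw [List.append_assoc]; exact ih _ _ _ _)

-- iterations the Python loop still performs from state (cs, curr_bytes = b)
def iters (cs : List (String × String × Int)) (b : Int) : Nat :=
  match cs with
  | [] => 0
  | (_, typ, size) :: rest =>
    (if typ == "dir" then 1 else max 1 (size - b).toNat) + iters rest 0

-- the tasks B emits for one child, parametrised by the loop's current position b
def headTasks (ss b : Int) (c : String × String × Int) : List (String × String × Int × Int) :=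
  if c.2.1 == "dir" then [(c.1, c.2.1, 0, c.2.2)]
  else if c.2.2 = 0 then [(c.1, c.2.1, 0, 0)]
  else (PySem.List.pyRange b c.2.2 ss).map (fun st => (c.1, c.2.1, st, min (st + ss) c.2.2))

theorem alt_cons (ss : Int) (c : String × String × Int) (rest : List (String × String × Int)) :
    create_tasks_py_alt (c :: rest) ss = headTasks ss 0 c ++ create_tasks_py_alt rest ss := by
  obtain ⟨n, t, s⟩ := c
  simp only [create_tasks_py_alt, List.flatMap_cons, headTasks, fileShards]

-- main loop invariant: from a valid state, with enough fuel, A's loop produces the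
-- head child's remaining shards followed by B's output for the remaining children
theorem aLoop_eq (ss : Int) : ∀ (fuel : Nat)
    (c : String × String × Int) (rest : List (String × String × Int)) (b : Int),
    (∀ x ∈ c :: rest, x.2.1 ≠ "dir" → (x.2.2 = 0 ∧ 0 ≤ ss) ∨ (0 < x.2.2 ∧ 1 ≤ ss)) →
    0 ≤ b →
    (b = 0 ∨ ((c.2.1 == "dir") = false ∧ b < c.2.2)) →
    iters (c :: rest) b ≤ fuel →
    aLoop ss fuel (c :: rest) b [] = headTasks ss b c ++ create_tasks_py_alt rest ss := by
  intro fuel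
  induction fuel with
  | zero =>
    rintro ⟨name, typ, size⟩ rest b _ _ _ hfuel
    exfalso
    cases h : (typ == "dir") <;>
      simp only [iters, h, Bool.false_eq_true, if_false, if_true] at hfuel <;> omega
  | succ f ih =>
    rintro ⟨name, typ, size⟩ rest b hnn hb hstate0 hfuel
    have hstate : b = 0 ∨ (typ == "dir") = false ∧ b < size := hstate0
    have hrest : ∀ x ∈ rest, x.2.1 ≠ "dir" → (x.2.2 = 0 ∧ 0 ≤ ss) ∨ (0 < x.2.2 ∧ 1 ≤ ss) :=
      fun x hx => hnn x (List.mem_cons_of_mem _ hx)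
    have hrest_eq : iters rest 0 ≤ f → aLoop ss f rest 0 [] = create_tasks_py_alt rest ss := by
      intro hg
      match rest with
      | [] => rw [aLoop_nil]; rfl
      | c2 :: r2 =>
        rw [ih c2 r2 0 hrest le_rfl (Or.inl rfl) hg, alt_cons]
    by_cases hdir : (typ == "dir") = true
    · -- directory: emit (name, typ, 0, size) and move to the next child
      simp only [iters, hdir, if_pos] at hfuel
      simp only [aLoop, hdir, if_pos, List.nil_append]
      have hx := aLoop_append ss f rest 0 [(name, typ, 0, size)] []
      simp only [List.append_nil] at hx
      rw [hx, hrest_eq (by omega)]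
      simp [headTasks, hdir]
    · -- file
      rw [Bool.not_eq_true] at hdir
      simp only [iters, hdir, Bool.false_eq_true, if_false] at hfuel
      have hF : (size = 0 ∧ 0 ≤ ss) ∨ (0 < size ∧ 1 ≤ ss) :=
        hnn (name, typ, size) List.mem_cons_self (fun h => absurd h (by simpa using hdir))
      have hsz : 0 ≤ size := by rcases hF with ⟨h, _⟩ | ⟨h, _⟩ <;> omega
      have hbs : b = 0 ∨ b < size := hstate.imp id And.right
      simp only [aLoop, hdir, Bool.false_eq_true, if_false, List.nil_append]
      by_cases hz : size = 0
      · -- zero-size file: b = 0, a single task (name, typ, 0, 0), move on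
        have hss0 : 0 ≤ ss := by rcases hF with ⟨_, h⟩ | ⟨h, _⟩ <;> omega
        have hb0 : b = 0 := by omega
        subst hb0; subst hz
        rw [if_neg (by omega), if_neg (by omega), if_pos (by omega)]
        have hmin : min ((0:Int) - 0) ss = 0 := by omega
        rw [hmin]
        have hx := aLoop_append ss f rest 0 [(name, typ, 0, 0 + 0)] []
        simp only [List.append_nil] at hx
        rw [hx, hrest_eq (by omega)]
        simp [headTasks, hdir]
      · -- nonzero file: 0 ≤ b < size
        have hss : 1 ≤ ss := by rcases hF with ⟨h, _⟩ | ⟨_, h⟩ <;> omega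
        have hblt : b < size := by rcases hbs with h | h <;> omega
        rw [if_neg (by omega), if_neg (by omega)]
        by_cases hlast : size - b - min (size - b) ss = 0
        · -- last shard of this file
          rw [if_pos hlast]
          have hx := aLoop_append ss f rest 0 [(name, typ, b, b + min (size - b) ss)] []
          simp only [List.append_nil] at hx
          rw [hx, hrest_eq (by omega)]
          have hrng : PySem.List.pyRange b size ss = [b] :=  by
            rw [pyRange_pos_cons b size ss (by omega) hblt,
                pyRange_pos_nil (b + ss) size ss (by omega) (by omega)]
          simp only [headTasks, hdir, Bool.false_eq_true, if_false, if_neg hz, hrng,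
            List.map_cons, List.map_nil]
          have : b + min (size - b) ss = min (b + ss) size := by omega
          rw [this]
        · -- middle shard: advance to position b + shard_size within the same file
          rw [if_neg hlast]
          have hpss : min (size - b) ss = ss := by omega
          rw [hpss] at hlast
          have hge : ss ≤ size - b := by omega
          have hx := aLoop_append ss f ((name, typ, size) :: rest) (b + min (size - b) ss)
            [(name, typ, b, b + min (size - b) ss)] []
          simp only [List.append_nil] at hx
          have hit : iters ((name, typ, size) :: rest) (b + min (size - b) ss) =
              max 1 (size - (b + min (size - b) ss)).toNat + iters rest 0 := by
            simp [iters, hdir]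
          rw [hx, ih (name, typ, size) rest (b + min (size - b) ss) hnn (by omega)
            (Or.inr ⟨hdir, show b + min (size - b) ss < size by omega⟩)
            (by rw [hit, hpss]; omega)]
          simp only [headTasks, hdir, Bool.false_eq_true, if_false, if_neg hz, hpss,
            ← List.append_assoc, List.singleton_append]
          have hmin2 : min (b + ss) size = b + ss := by omega
          rw [pyRange_pos_cons b size ss (by omega) hblt, List.map_cons, hmin2]

theorem foldl_fuel_shift : ∀ (cs : List (String × String × Int)) (acc : Nat),
    List.foldl (fun a c => a + c.2.2.natAbs + 1) acc cs =
      acc + List.foldl (fun a c => a + c.2.2.natAbs + 1) 0 cs := by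
  intro cs
  induction cs with
  | nil => intro acc; simp
  | cons c rest ih =>
    intro acc
    simp only [List.foldl_cons]
    rw [ih (acc + c.2.2.natAbs + 1), ih (0 + c.2.2.natAbs + 1)]
    omega

theorem iters_le_aFuel (cs : List (String × String × Int)) : iters cs 0 ≤ aFuel cs := by
  induction cs with
  | nil => simp [iters, aFuel]
  | cons c rest ih =>
    obtain ⟨n, t, s⟩ := c
    simp only [iters, aFuel, List.foldl_cons] at *
    rw [foldl_fuel_shift rest (1 + s.natAbs + 1)]
    rw [foldl_fuel_shift rest 1] at ih
    split_ifs <;> omega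

-- ===== VERDICT (by name: the statement is the Claim_ definition above) =====
theorem create_tasks_py_spec : Claim_equal_create_tasks_py := by
  rintro children shard_size _ ⟨hnn, hd⟩
  have H : ∀ x ∈ children, x.2.1 ≠ "dir" →
      (x.2.2 = 0 ∧ 0 ≤ shard_size) ∨ (0 < x.2.2 ∧ 1 ≤ shard_size) := by
    intro x hx hne
    have hx0 := hnn x hx hne
    rcases hd with hss | hdir | ⟨hz, hall⟩
    · rcases eq_or_lt_of_le hx0 with h | h
      · exact Or.inl ⟨h.symm, by omega⟩
      · exact Or.inr ⟨h, hss⟩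
    · exact absurd (hdir x hx) hne
    · exact Or.inl ⟨hall x hx hne, by omega⟩
  unfold Spec_create_tasks_py create_tasks_py
  match children with
  | [] => rw [aLoop_nil]; rfl
  | c :: rest =>
    rw [aLoop_eq shard_size (aFuel (c :: rest)) c rest 0 H le_rfl (Or.inl rfl)
      (iters_le_aFuel (c :: rest)), alt_cons]
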